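-- pv_equiv track=rewrite | github.com/Seceum/SeceumFL | fateflow/python/fate_flow/web_server/utils/model_train_util.py | convent_canceled_status
-- ===== SOURCE A (Python) =====
-- def convent_canceled_status(data):
--     # input data=[{"a":1,"status":"canceled"},{"b":1,"status":"waiting"},{"c":1,"status":"success"}]
--     # out data=[{"a":1,"status":"canceled"},{"b":1,"status":"canceled"},{"c":1,"status":"success"}]
--     flag =False
--     for i in data:
--         if i["status"]=="canceled":
--             flag=True
--             break
--     if flag==True:
--         for i in data:
--             if i["status"] == "waiting":
--                 i["status"]="canceled"
--     return data
-- ===== SOURCE B (Python) =====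
-- def convent_canceled_status(data):
--     found_canceled = False
--     waiting_refs = []
--     for d in data:
--         s = d["status"]
--         if s == "canceled":
--             found_canceled = True
--         elif s == "waiting":
--             waiting_refs.append(d)
--     if found_canceled:
--         for d in waiting_refs:
--             d["status"] = "canceled"
--     return data
-- ===== Notes on version B (the rewrite author's own statement) =====
-- stated objective: alternative
-- what changed: Single pass that both detects a canceled status and collects references to the waiting dicts, followed by a second pass over only that collected subset, instead of A's two full scans of data (a find-then-break scan plus a full rescan).
import Mathlib
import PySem

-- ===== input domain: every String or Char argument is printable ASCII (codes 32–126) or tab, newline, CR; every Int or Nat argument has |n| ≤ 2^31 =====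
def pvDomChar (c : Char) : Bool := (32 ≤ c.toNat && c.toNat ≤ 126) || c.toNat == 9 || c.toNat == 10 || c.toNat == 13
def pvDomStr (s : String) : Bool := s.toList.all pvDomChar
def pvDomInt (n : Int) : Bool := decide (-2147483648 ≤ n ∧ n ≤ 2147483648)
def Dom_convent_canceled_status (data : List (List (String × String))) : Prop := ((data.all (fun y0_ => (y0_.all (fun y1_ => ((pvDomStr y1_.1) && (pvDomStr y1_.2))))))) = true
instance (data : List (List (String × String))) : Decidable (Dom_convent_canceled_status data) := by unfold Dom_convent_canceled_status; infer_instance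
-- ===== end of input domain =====

-- B replaces A's two full scans of data by one combined scan (detect a canceled status and
-- collect the waiting dicts) plus a second pass over only the collected waiting subset;
-- objective: alternative decomposition, same complexity. Both A and B mutate the dicts in
-- place in Python; the equivalence proved here is about the returned value (which is the
-- same list object in both).

-- shared accessors for the dict primitives i["status"] and i["status"] = "canceled"
def pvStatus (d : List (String × String)) : String :=
  ((PySem.Dict.mk d).get? "status").getD ""   -- d["status"]; KeyError (none) excluded by Pre_

def pvSetCanceled (d : List (String × String)) : List (String × String) :=
  ((PySem.Dict.mk d).insert "status" "canceled").items   -- d["status"] = "canceled"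

-- ===== PORT A =====
def convent_canceled_status (data : List (List (String × String))) : List (List (String × String)) :=
  -- flag = False; for i in data: if i["status"]=="canceled": flag=True; break
  -- if flag: for i in data: if i["status"]=="waiting": i["status"]="canceled"
  if data.foldl (fun f i => if f then f else pvStatus i == "canceled") false then
    data.map (fun i => if pvStatus i == "waiting" then pvSetCanceled i else i)
  else data

-- ===== PORT B =====
-- the single pass of Source B: returns (found_canceled, waiting_refs) where the mutable
-- references of Source B are represented by the positions of the waiting dicts in data
def pvScanB : List (List (String × String)) → Nat → Bool × List Nat
  | [], _ => (false, [])
  | d :: rest, k =>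
    let r := pvScanB rest (k + 1)
    if pvStatus d == "canceled" then (true, r.2)
    else if pvStatus d == "waiting" then (r.1, k :: r.2)
    else r

def convent_canceled_status_alt (data : List (List (String × String))) : List (List (String × String)) :=
  if (pvScanB data 0).1 then
    -- for d in waiting_refs: d["status"] = "canceled"
    (pvScanB data 0).2.foldl (fun acc j => acc.modify j pvSetCanceled) data
  else data

-- ===== PRECONDITION & SPEC =====
-- Pre_ excludes exactly the inputs on which the Python A raises KeyError: some dict
-- without a "status" key (A reads i["status"] on every dict it reaches, and it reaches
-- all of them whether or not a canceled status exists).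
def Pre_convent_canceled_status (data : List (List (String × String))) : Prop :=
  ∀ d ∈ data, ((PySem.Dict.mk d).get? "status").isSome = true

instance (data : List (List (String × String))) : Decidable (Pre_convent_canceled_status data) := by
  unfold Pre_convent_canceled_status; infer_instance

def pvWitness_convent_canceled_status : (List (List (String × String))) :=
  [[("a", "1"), ("status", "canceled")], [("b", "1"), ("status", "waiting")], [("status", "success")]]

def Spec_convent_canceled_status (data : List (List (String × String))) (out : List (List (String × String))) : Prop := out = convent_canceled_status_alt data
instance (data : List (List (String × String))) (out : List (List (String × String))) : Decidable (Spec_convent_canceled_status data out) := by unfold Spec_convent_canceled_status; infer_instance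

-- ===== CLAIM (what is proved, stated in full; the proofs are below) =====
def Claim_equal_convent_canceled_status : Prop := ∀ (data : List (List (String × String))), Dom_convent_canceled_status data → Pre_convent_canceled_status data → Spec_convent_canceled_status data (convent_canceled_status data)

-- ===== LEMMAS AND PROOFS =====

-- A's break-out flag loop computes "some status is canceled"
theorem pv_flag_eq (l : List (List (String × String))) (b : Bool) :
    l.foldl (fun f i => if f then f else pvStatus i == "canceled") b
      = (b || l.any (fun i => pvStatus i == "canceled")) := by
  induction l generalizing b with
  | nil => simp
  | cons d rest ih =>
    cases b <;> simp [List.foldl_cons, ih]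

-- B's found_canceled is the same condition
theorem pv_scan_fst (l : List (List (String × String))) (k : Nat) :
    (pvScanB l k).1 = l.any (fun i => pvStatus i == "canceled") := by
  induction l generalizing k with
  | nil => simp [pvScanB]
  | cons d rest ih =>
    simp only [pvScanB, List.any_cons]
    split_ifs with h1 h2 <;> simp [ih, h1]

theorem pv_modify_at_len {α : Type} (ys : List α) (d : α) (rest : List α) (f : α → α) :
    (ys ++ d :: rest).modify ys.length f = ys ++ f d :: rest := by
  induction ys with
  | nil => simp
  | cons y ys ih =>
    have step : ∀ (g : List α → List α) (n : Nat) (a : α) (l : List α),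
        List.modifyTailIdx.go g (n + 1) (a :: l) = a :: List.modifyTailIdx.go g n l :=
      fun _ _ _ _ => rfl
    simp only [List.cons_append, List.length_cons, List.modify, List.modifyTailIdx] at *
    rw [step, ih]

-- updating data at the collected waiting positions = A's conditional map
theorem pv_apply_scan (l ys : List (List (String × String))) :
    ((pvScanB l ys.length).2).foldl (fun acc j => acc.modify j pvSetCanceled) (ys ++ l)
      = ys ++ l.map (fun i => if pvStatus i == "waiting" then pvSetCanceled i else i) := by
  induction l generalizing ys with
  | nil => simp [pvScanB]
  | cons d rest ih =>
    simp only [pvScanB]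
    split_ifs with h1 h2
    · -- status == "canceled": not collected, map leaves d unchanged
      have hne : (pvStatus d == "waiting") = false := by
        have hc : pvStatus d = "canceled" := by simpa using h1
        simp [hc]
      have h' := ih (ys ++ [d])
      simp only [List.append_assoc, List.singleton_append, List.length_append,
        List.length_cons, List.length_nil, Nat.zero_add] at h'
      rw [List.map_cons, hne]
      simpa using h'
    · -- status == "waiting": collected at position ys.length
      rw [List.map_cons, if_pos h2]
      simp only [List.foldl_cons, pv_modify_at_len]
      have h' := ih (ys ++ [pvSetCanceled d])
      simp only [List.append_assoc, List.singleton_append, List.length_append,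
        List.length_cons, List.length_nil, Nat.zero_add] at h'
      simpa using h'
    · -- other status: not collected, unchanged
      rw [List.map_cons, if_neg h2]
      have h' := ih (ys ++ [d])
      simp only [List.append_assoc, List.singleton_append, List.length_append,
        List.length_cons, List.length_nil, Nat.zero_add] at h'
      simpa using h'

-- ===== VERDICT (by name: the statement is the Claim_ definition above) =====
theorem convent_canceled_status_spec : Claim_equal_convent_canceled_status := by
  intro data _ _
  unfold Spec_convent_canceled_status convent_canceled_status convent_canceled_status_alt
  rw [pv_flag_eq, Bool.false_or, pv_scan_fst]
  cases h : data.any (fun i => pvStatus i == "canceled") with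
  | false => simp
  | true =>
    simp only [if_true]
    have := pv_apply_scan data []
    simpa using this.symm
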